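-- pv_equiv track=rewrite | github.com/Lolleeee/MIEEG | packages/models/variational_autoencoder_convnext.py | _compute_encoder_spatial_dims
-- ===== SOURCE A (Python) =====
-- def _compute_encoder_spatial_dims(input_shape, num_layers):
--     '''Compute spatial dimensions at each encoder layer'''
--     dims = [input_shape]
--     h, w, d = input_shape
--
--     for i in range(num_layers):
--         if i == 0:
--             h_new, w_new, d_new = h, w, d
--         else:
--             h_new = (h + 2 * 0 - 2) // 2 + 1
--             w_new = (w + 2 * 0 - 2) // 2 + 1
--             d_new = (d + 2 * 0 - 2) // 2 + 1
--
--         h, w, d = h_new, w_new, d_new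
--         dims.append((h, w, d))
--
--     return dims
-- ===== SOURCE B (Python) =====
-- def _compute_encoder_spatial_dims(input_shape, num_layers):
--     '''Compute spatial dimensions at each encoder layer'''
--     h, w, d = input_shape
--     return [input_shape] + [(h >> i, w >> i, d >> i)
--                             for i in range(num_layers)]
-- ===== Notes on version B (the rewrite author's own statement) =====
-- stated objective: simpler
-- what changed: A's per-layer update (x+2*0-2)//2+1 with carried (h,w,d) state and an i==0 special case is replaced by the closed form: layer i's dims are input_shape//2**i, computed directly in a comprehension with no running state or branch.
import Mathlib
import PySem

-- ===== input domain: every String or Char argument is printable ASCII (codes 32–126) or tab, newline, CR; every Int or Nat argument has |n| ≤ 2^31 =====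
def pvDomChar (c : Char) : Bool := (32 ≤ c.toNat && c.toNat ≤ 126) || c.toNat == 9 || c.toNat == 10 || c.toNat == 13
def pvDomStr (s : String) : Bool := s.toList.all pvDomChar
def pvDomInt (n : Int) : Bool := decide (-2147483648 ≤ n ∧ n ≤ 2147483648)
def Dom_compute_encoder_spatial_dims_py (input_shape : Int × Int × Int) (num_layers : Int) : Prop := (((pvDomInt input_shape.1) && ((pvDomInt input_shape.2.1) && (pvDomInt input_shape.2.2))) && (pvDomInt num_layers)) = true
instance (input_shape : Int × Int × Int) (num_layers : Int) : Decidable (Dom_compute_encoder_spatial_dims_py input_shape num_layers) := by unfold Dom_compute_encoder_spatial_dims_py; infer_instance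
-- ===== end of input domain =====

-- B replaces A's carried running state and i==0 special case with a closed form: layer i's dims are input_shape // 2**i.

-- ===== PORT A =====
-- literal transliteration of A: running (h,w,d) state, dims accumulator, i==0 branch
def compute_encoder_spatial_dims_py (input_shape : Int × Int × Int) (num_layers : Int) : List (Int × Int × Int) :=
  let st := (PySem.List.pyRange 0 num_layers 1).foldl
    (fun (st : Int × Int × Int × List (Int × Int × Int)) i =>
      let h := st.1; let w := st.2.1; let d := st.2.2.1; let dims := st.2.2.2
      let hn := if i == 0 then h else PySem.Int.floordiv (h + 2*0 - 2) 2 + 1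
      let wn := if i == 0 then w else PySem.Int.floordiv (w + 2*0 - 2) 2 + 1
      let dn := if i == 0 then d else PySem.Int.floordiv (d + 2*0 - 2) 2 + 1
      (hn, wn, dn, dims ++ [(hn, wn, dn)]))
    (input_shape.1, input_shape.2.1, input_shape.2.2, [input_shape])
  st.2.2.2

-- ===== PORT B =====
-- literal transliteration of B: [input_shape] + comprehension over range(num_layers), each entry
-- (h >> i, w >> i, d >> i); Python's '>>' on ints is the arithmetic shift, exact here since every
-- i from range(num_layers) is ≥ 0, matching '>>> i.toNat'
def compute_encoder_spatial_dims_py_alt (input_shape : Int × Int × Int) (num_layers : Int) : List (Int × Int × Int) :=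
  input_shape :: (PySem.List.pyRange 0 num_layers 1).map
    (fun i => (input_shape.1 >>> i.toNat, input_shape.2.1 >>> i.toNat, input_shape.2.2 >>> i.toNat))

-- ===== PRECONDITION & SPEC =====
def Spec_compute_encoder_spatial_dims_py (input_shape : Int × Int × Int) (num_layers : Int) (out : List (Int × Int × Int)) : Prop := out = compute_encoder_spatial_dims_py_alt input_shape num_layers
instance (input_shape : Int × Int × Int) (num_layers : Int) (out : List (Int × Int × Int)) : Decidable (Spec_compute_encoder_spatial_dims_py input_shape num_layers out) := by unfold Spec_compute_encoder_spatial_dims_py; infer_instance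

-- ===== CLAIM (what is proved, stated in full; the proofs are below) =====
def Claim_equal_compute_encoder_spatial_dims_py : Prop := ∀ (input_shape : Int × Int × Int) (num_layers : Int), Dom_compute_encoder_spatial_dims_py input_shape num_layers → Spec_compute_encoder_spatial_dims_py input_shape num_layers (compute_encoder_spatial_dims_py input_shape num_layers)

-- ===== LEMMAS AND PROOFS =====

-- Python's arithmetic right shift is floor division by a power of two
theorem pvShift_eq (x : Int) (k : Nat) : x >>> (k : Int) = PySem.Int.floordiv x (2 ^ k) := by
  rw [Int.shiftRight_natCast_right, Int.shiftRight_eq_div_pow, PySem.Int.floordiv_eq_ediv_of_pos (by positivity)]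
  push_cast; rfl

-- A's per-layer update (x + 2*0 - 2)//2 + 1 is floor halving
theorem pvStep_eq (x : Int) : PySem.Int.floordiv (x + 2*0 - 2) 2 + 1 = PySem.Int.floordiv x 2 := by
  rw [PySem.Int.floordiv_eq_ediv_of_pos (by omega), PySem.Int.floordiv_eq_ediv_of_pos (by omega)]
  omega

-- halving a floored power-of-two quotient once more
theorem pvHalf_pow (x : Int) (k : Nat) :
    PySem.Int.floordiv (PySem.Int.floordiv x (2 ^ k)) 2 = PySem.Int.floordiv x (2 ^ (k + 1)) := by
  rw [PySem.Int.floordiv_eq_ediv_of_pos (b := (2:Int) ^ k) (by positivity),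
      PySem.Int.floordiv_eq_ediv_of_pos (by omega),
      PySem.Int.floordiv_eq_ediv_of_pos (b := (2:Int) ^ (k+1)) (by positivity),
      pow_succ]
  exact Int.ediv_ediv_of_nonneg (by positivity)

-- the fold invariant: after n ≥ 1 steps the state carries input//2^(n-1) and dims is B's list
theorem pvFold_inv (s : Int × Int × Int) (n : Nat) (hn : 1 ≤ n) :
    (PySem.List.pyRange 0 (n : Int) 1).foldl
      (fun (st : Int × Int × Int × List (Int × Int × Int)) i =>
        let h := st.1; let w := st.2.1; let d := st.2.2.1; let dims := st.2.2.2
        let hn := if i == 0 then h else PySem.Int.floordiv (h + 2*0 - 2) 2 + 1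
        let wn := if i == 0 then w else PySem.Int.floordiv (w + 2*0 - 2) 2 + 1
        let dn := if i == 0 then d else PySem.Int.floordiv (d + 2*0 - 2) 2 + 1
        (hn, wn, dn, dims ++ [(hn, wn, dn)]))
      (s.1, s.2.1, s.2.2, [s])
    = (PySem.Int.floordiv s.1 (2 ^ (n - 1)), PySem.Int.floordiv s.2.1 (2 ^ (n - 1)),
       PySem.Int.floordiv s.2.2 (2 ^ (n - 1)),
       s :: (PySem.List.pyRange 0 (n : Int) 1).map
         (fun i => (PySem.Int.floordiv s.1 (2 ^ i.toNat),
                    PySem.Int.floordiv s.2.1 (2 ^ i.toNat),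
                    PySem.Int.floordiv s.2.2 (2 ^ i.toNat)))) := by
  induction n with
  | zero => omega
  | succ m ih =>
    rw [show ((m + 1 : Nat) : Int) = (m : Int) + 1 by push_cast; ring,
        PySem.List.pyRange_one_succ_right (by positivity)]
    rcases Nat.eq_zero_or_pos m with hm | hm
    · subst hm
      norm_num [PySem.Int.floordiv]
    · rw [List.foldl_append, ih hm]
      simp only [List.foldl_cons, List.foldl_nil, List.map_append, List.map_cons, List.map_nil]
      have hne : ((m : Int) == 0) = false := by
        simp only [beq_eq_false_iff_ne, ne_eq]; omega
      simp only [hne, pvStep_eq]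
      have hms : m - 1 + 1 = m := by omega
      have h1 : (m : Int).toNat = m := by omega
      rw [pvHalf_pow, pvHalf_pow, pvHalf_pow, hms]
      simp [h1]

-- ===== VERDICT (by name: the statement is the Claim_ definition above) =====
theorem compute_encoder_spatial_dims_py_spec : Claim_equal_compute_encoder_spatial_dims_py := by
  intro s nl _
  unfold Spec_compute_encoder_spatial_dims_py compute_encoder_spatial_dims_py compute_encoder_spatial_dims_py_alt
  by_cases h : nl ≤ 0
  · rw [PySem.List.pyRange_one_eq_nil h]; rfl
  · obtain ⟨n, rfl⟩ : ∃ n : Nat, nl = (n : Int) := ⟨nl.toNat, by omega⟩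
    have hn : 1 ≤ n := by omega
    simp only [pvShift_eq]
    rw [pvFold_inv s n hn]
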